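-- pv_equiv track=rewrite | github.com/huawei-csl/wse-workload-generator | src/node_level/common/config.py | get_comm_groups
-- ===== SOURCE A (Python) =====
-- from collections import OrderedDict
--
-- def get_comm_groups(num_nodes: int, par_degrees: OrderedDict):
--     comm_groups = OrderedDict({key: {} for key in par_degrees})
--     ranks = OrderedDict({key: {} for key in par_degrees})
--     for rank in range(num_nodes):
--         subcluster_size = 1
--         cluster_size = 1
--         rank_offset = 0
--
--         for par_type in par_degrees:
--             par_degree = par_degrees[par_type]
--             ranks[par_type][rank] = (rank // cluster_size) % par_degree
--             cluster_size = subcluster_size*par_degree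
--             cluster_offset = (rank // cluster_size) * cluster_size
--             comm_groups[par_type][rank] = sorted([(rank_offset + j*subcluster_size) % cluster_size + cluster_offset for j in range(par_degree)])
--             rank_offset = rank_offset + ranks[par_type][rank]*subcluster_size
--             subcluster_size = cluster_size
--
--     return comm_groups, ranks
-- ===== SOURCE B (Python) =====
-- from collections import OrderedDict
--
--
-- def get_comm_groups(num_nodes: int, par_degrees: OrderedDict):
--     # Closed-form mixed-radix view of ranks: strides are precomputed in one pass;
--     # each dimension's communication group is emitted directly as the ascending
--     # arithmetic progression (rank//cs)*cs + rank%s + j*s, so there is no threaded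
--     # offset accumulator, no per-element modulo and no sort.
--     items = list(par_degrees.items())
--     strides = []
--     s = 1
--     for _, d in items:
--         strides.append(s)
--         s *= d
--     comm_groups = OrderedDict()
--     ranks = OrderedDict()
--     for (pt, d), s in zip(items, strides):
--         cs = s * d
--         rmap = {}
--         gmap = {}
--         for rank in range(num_nodes):
--             rmap[rank] = (rank // s) % d
--             base = (rank // cs) * cs + rank % s
--             gmap[rank] = [base + j * s for j in range(d)]
--         comm_groups[pt] = gmap
--         ranks[pt] = rmap
--     return comm_groups, ranks
-- ===== Notes on version B (the rewrite author's own statement) =====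
-- stated objective: alternative
-- what changed: Replaces A's per-rank stateful scan (threaded subcluster/cluster sizes and offset accumulator, per-element modulo, and a sort of every group) by closed-form mixed-radix arithmetic: strides are precomputed in one pass and each communication group is emitted directly as the ascending arithmetic progression (rank//cs)*cs + rank%s + j*s, with no accumulator, no modulo and no sort.
import Mathlib
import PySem

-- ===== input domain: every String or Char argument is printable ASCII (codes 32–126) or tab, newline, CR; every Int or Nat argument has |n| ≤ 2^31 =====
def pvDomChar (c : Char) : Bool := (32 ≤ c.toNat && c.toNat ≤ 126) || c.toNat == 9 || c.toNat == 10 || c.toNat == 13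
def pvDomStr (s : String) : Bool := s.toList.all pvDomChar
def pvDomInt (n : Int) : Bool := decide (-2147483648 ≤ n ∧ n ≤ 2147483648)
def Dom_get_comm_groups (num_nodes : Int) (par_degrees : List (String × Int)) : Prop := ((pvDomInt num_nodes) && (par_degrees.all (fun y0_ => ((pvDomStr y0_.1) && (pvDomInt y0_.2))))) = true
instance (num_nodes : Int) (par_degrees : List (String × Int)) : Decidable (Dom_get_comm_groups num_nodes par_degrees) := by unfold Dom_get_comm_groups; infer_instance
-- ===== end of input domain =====

-- B replaces A's per-rank stateful scan (threaded subcluster/cluster/offset, a modulo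
-- per group element, and a sort) by closed-form arithmetic on the mixed-radix view of
-- ranks: strides are precomputed in one pass and each group is emitted directly as an
-- ascending arithmetic progression (objective: alternative).

-- ===== PORT A =====
-- one iteration of A's inner 'for par_type in par_degrees' loop;
-- state = ((subcluster_size, cluster_size, rank_offset), comm_groups, ranks)
def pvAStep (par_degrees : List (String × Int)) (rank : Int)
    (st : (Int × Int × Int) × PySem.Dict String (PySem.Dict Int (List Int)) × PySem.Dict String (PySem.Dict Int Int))
    (p : String × Int) :
    (Int × Int × Int) × PySem.Dict String (PySem.Dict Int (List Int)) × PySem.Dict String (PySem.Dict Int Int) :=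
  let subcluster_size := st.1.1
  let cluster_size := st.1.2.1
  let rank_offset := st.1.2.2
  let par_degree := (PySem.Dict.mk par_degrees).getD p.1 0   -- par_degrees[par_type]
  let r := PySem.Int.mod (PySem.Int.floordiv rank cluster_size) par_degree
  let ranks' := st.2.2.insert p.1 ((st.2.2.getD p.1 PySem.Dict.empty).insert rank r)
  let cluster_size' := subcluster_size * par_degree
  let cluster_offset := PySem.Int.floordiv rank cluster_size' * cluster_size'
  let grp := PySem.List.sorted
      ((PySem.List.pyRange 0 par_degree 1).map
        (fun j => PySem.Int.mod (rank_offset + j * subcluster_size) cluster_size' + cluster_offset))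
      (fun x => x) false
  let cg' := st.2.1.insert p.1 ((st.2.1.getD p.1 PySem.Dict.empty).insert rank grp)
  ((cluster_size', cluster_size', rank_offset + r * subcluster_size), cg', ranks')

-- body of A's outer 'for rank in range(num_nodes)' loop
def pvARank (par_degrees : List (String × Int))
    (acc : PySem.Dict String (PySem.Dict Int (List Int)) × PySem.Dict String (PySem.Dict Int Int))
    (rank : Int) :
    PySem.Dict String (PySem.Dict Int (List Int)) × PySem.Dict String (PySem.Dict Int Int) :=
  let st := par_degrees.foldl (pvAStep par_degrees rank) ((1, 1, 0), acc.1, acc.2)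
  (st.2.1, st.2.2)

def get_comm_groups (num_nodes : Int) (par_degrees : List (String × Int)) :
    (List (String × List (Int × List Int))) × (List (String × List (Int × Int))) :=
  let cg0 : PySem.Dict String (PySem.Dict Int (List Int)) :=
    par_degrees.foldl (fun d p => d.insert p.1 PySem.Dict.empty) PySem.Dict.empty
  let rk0 : PySem.Dict String (PySem.Dict Int Int) :=
    par_degrees.foldl (fun d p => d.insert p.1 PySem.Dict.empty) PySem.Dict.empty
  let res := (PySem.List.pyRange 0 num_nodes 1).foldl (pvARank par_degrees) (cg0, rk0)
  (res.1.items.map (fun q => (q.1, q.2.items)), res.2.items.map (fun q => (q.1, q.2.items)))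

-- ===== PORT B =====
-- one iteration of B's inner 'for rank in range(num_nodes)' loop; state = (rmap, gmap)
def pvBRankStep (s d cs : Int)
    (acc : PySem.Dict Int Int × PySem.Dict Int (List Int)) (rank : Int) :
    PySem.Dict Int Int × PySem.Dict Int (List Int) :=
  let r := PySem.Int.mod (PySem.Int.floordiv rank s) d
  let base := PySem.Int.floordiv rank cs * cs + PySem.Int.mod rank s
  (acc.1.insert rank r,
   acc.2.insert rank ((PySem.List.pyRange 0 d 1).map (fun j => base + j * s)))

-- body of B's outer 'for (pt, d), s in zip(items, strides)' loop
def pvBDimStep (num_nodes : Int)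
    (st : PySem.Dict String (PySem.Dict Int (List Int)) × PySem.Dict String (PySem.Dict Int Int))
    (q : (String × Int) × Int) :
    PySem.Dict String (PySem.Dict Int (List Int)) × PySem.Dict String (PySem.Dict Int Int) :=
  let cs := q.2 * q.1.2
  let inner := (PySem.List.pyRange 0 num_nodes 1).foldl
      (pvBRankStep q.2 q.1.2 cs) (PySem.Dict.empty, PySem.Dict.empty)
  (st.1.insert q.1.1 inner.2, st.2.insert q.1.1 inner.1)

def get_comm_groups_alt (num_nodes : Int) (par_degrees : List (String × Int)) :
    (List (String × List (Int × List Int))) × (List (String × List (Int × Int))) :=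
  -- first pass: strides (running product of the preceding degrees)
  let strides := (par_degrees.foldl
      (fun (a : List Int × Int) p => (a.1 ++ [a.2], a.2 * p.2)) ([], 1)).1
  let res := (par_degrees.zip strides).foldl (pvBDimStep num_nodes)
      (PySem.Dict.empty, PySem.Dict.empty)
  (res.1.items.map (fun q => (q.1, q.2.items)), res.2.items.map (fun q => (q.1, q.2.items)))

-- ===== PRECONDITION & SPEC =====
-- Pre_ excludes association lists with duplicate keys (cannot arise from A's Python dict
-- argument), inputs where num_nodes > 0 and some degree is 0 (A raises ZeroDivisionError),
-- and inputs where num_nodes > 0 and some degree is negative: a negative parallelism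
-- degree is outside the function's natural domain (degrees are counts) and A's group
-- contents there are artefacts of its leftover offset state.
def Pre_get_comm_groups (num_nodes : Int) (par_degrees : List (String × Int)) : Prop :=
  (par_degrees.map (fun p => p.1)).Nodup ∧
    (num_nodes ≤ 0 ∨ ∀ p ∈ par_degrees, 0 < p.2)
instance (num_nodes : Int) (par_degrees : List (String × Int)) : Decidable (Pre_get_comm_groups num_nodes par_degrees) := by unfold Pre_get_comm_groups; infer_instance

def pvWitness_get_comm_groups : Int × (List (String × Int)) := (4, [("tp", 2), ("dp", 2)])

def Spec_get_comm_groups (num_nodes : Int) (par_degrees : List (String × Int)) (out : (List (String × List (Int × List Int))) × (List (String × List (Int × Int)))) : Prop := out = get_comm_groups_alt num_nodes par_degrees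
instance (num_nodes : Int) (par_degrees : List (String × Int)) (out : (List (String × List (Int × List Int))) × (List (String × List (Int × Int)))) : Decidable (Spec_get_comm_groups num_nodes par_degrees out) := by unfold Spec_get_comm_groups; infer_instance

-- ===== CLAIM (what is proved, stated in full; the proofs are below) =====
def Claim_equal_get_comm_groups : Prop := ∀ (num_nodes : Int) (par_degrees : List (String × Int)), Dom_get_comm_groups num_nodes par_degrees → Pre_get_comm_groups num_nodes par_degrees → Spec_get_comm_groups num_nodes par_degrees (get_comm_groups num_nodes par_degrees)

-- ===== LEMMAS AND PROOFS =====

-- Pure per-cell values at a dimension with stride s, accumulated offset o and degree d.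
def rkVal (rank s d : Int) : Int := PySem.Int.mod (PySem.Int.floordiv rank s) d

def grpVal (rank s o d : Int) : List Int :=
  PySem.List.sorted
    ((PySem.List.pyRange 0 d 1).map
      (fun j => PySem.Int.mod (o + j * s) (s * d) + PySem.Int.floordiv rank (s * d) * (s * d)))
    (fun x => x) false

-- B's closed-form group: ascending arithmetic progression
def bVal (rank s d : Int) : List Int :=
  (PySem.List.pyRange 0 d 1).map
    (fun j => PySem.Int.floordiv rank (s * d) * (s * d) + PySem.Int.mod rank s + j * s)

def sProd (ds : List Int) : Int := ds.foldl (· * ·) 1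

def pvSO (rank : Int) (so : Int × Int) (d : Int) : Int × Int :=
  (so.1 * d, so.2 + rkVal rank so.1 d * so.1)

def oAcc (rank : Int) (ds : List Int) : Int := (ds.foldl (pvSO rank) (1, 0)).2

-- A's target tables: columns of comm_groups / ranks for the first N ranks
def tgoC (N : Nat) : List (String × Int) → List Int → List (String × PySem.Dict Int (List Int))
  | [], _ => []
  | p :: rest, pre =>
      (p.1, PySem.Dict.mk (List.map (fun k : Nat => ((k : Int), grpVal k (sProd pre) (oAcc k pre) p.2)) (List.range N)))
        :: tgoC N rest (pre ++ [p.2])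

-- B's target comm_groups table, with the closed-form groups
def tgoB (N : Nat) : List (String × Int) → List Int → List (String × PySem.Dict Int (List Int))
  | [], _ => []
  | p :: rest, pre =>
      (p.1, PySem.Dict.mk (List.map (fun k : Nat => ((k : Int), bVal k (sProd pre) p.2)) (List.range N)))
        :: tgoB N rest (pre ++ [p.2])

def tgoR (N : Nat) : List (String × Int) → List Int → List (String × PySem.Dict Int Int)
  | [], _ => []
  | p :: rest, pre =>
      (p.1, PySem.Dict.mk (List.map (fun k : Nat => ((k : Int), rkVal k (sProd pre) p.2)) (List.range N)))
        :: tgoR N rest (pre ++ [p.2])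

-- strides list produced by B's first pass
def stridesFrom : Int → List (String × Int) → List Int
  | _, [] => []
  | s, p :: r => s :: stridesFrom (s * p.2) r

lemma tgoC_keys (N : Nat) (rest : List (String × Int)) (pre : List Int) :
    (tgoC N rest pre).map (fun q => q.1) = rest.map (fun p => p.1) := by
  induction rest generalizing pre with
  | nil => rfl
  | cons p rest ih => simp [tgoC, ih]

lemma tgoR_keys (N : Nat) (rest : List (String × Int)) (pre : List Int) :
    (tgoR N rest pre).map (fun q => q.1) = rest.map (fun p => p.1) := by
  induction rest generalizing pre with
  | nil => rfl
  | cons p rest ih => simp [tgoR, ih]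

lemma tgoC_zero (rest : List (String × Int)) (pre : List Int) :
    tgoC 0 rest pre = rest.map (fun p => (p.1, PySem.Dict.mk [])) := by
  induction rest generalizing pre with
  | nil => rfl
  | cons p rest ih => simp [tgoC, ih]

lemma tgoB_zero (rest : List (String × Int)) (pre : List Int) :
    tgoB 0 rest pre = rest.map (fun p => (p.1, PySem.Dict.mk [])) := by
  induction rest generalizing pre with
  | nil => rfl
  | cons p rest ih => simp [tgoB, ih]

lemma tgoR_zero (rest : List (String × Int)) (pre : List Int) :
    tgoR 0 rest pre = rest.map (fun p => (p.1, PySem.Dict.mk [])) := by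
  induction rest generalizing pre with
  | nil => rfl
  | cons p rest ih => simp [tgoR, ih]

lemma pvSO_fold_fst (rank : Int) (ds : List Int) :
    ∀ (s o : Int), (ds.foldl (pvSO rank) (s, o)).1 = ds.foldl (· * ·) s := by
  induction ds with
  | nil => intro s o; rfl
  | cons d ds ih => intro s o; simpa [pvSO] using ih (s * d) _

lemma sProd_append (ds : List Int) (d : Int) : sProd (ds ++ [d]) = sProd ds * d := by
  simp [sProd]

lemma sProd_pos (ds : List Int) (h : ∀ d ∈ ds, 0 < d) : 0 < sProd ds := by
  induction ds using List.reverseRecOn with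
  | nil => norm_num [sProd]
  | append_singleton ds d ih =>
      rw [sProd_append]
      exact mul_pos (ih (fun x hx => h x (List.mem_append_left _ hx)))
        (h d (List.mem_append_right _ (by simp)))

lemma oAcc_append (r : Int) (ds : List Int) (d : Int) :
    oAcc r (ds ++ [d]) = oAcc r ds + rkVal r (sProd ds) d * sProd ds := by
  unfold oAcc
  rw [List.foldl_append]
  have h := pvSO_fold_fst r ds 1 0
  simp only [List.foldl_cons, List.foldl_nil, pvSO]
  rw [h]
  rfl

-- Python-mod range for a positive divisor
lemma mod_bounds (a s : Int) (hs : 0 < s) :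
    0 ≤ PySem.Int.mod a s ∧ PySem.Int.mod a s < s := by
  rw [PySem.Int.mod_eq_emod_of_pos hs]
  exact ⟨Int.emod_nonneg _ (by omega), Int.emod_lt_of_pos _ hs⟩

-- mixed-radix decomposition of the remainder, positive divisors
lemma mod_decomp (k s d : Int) (hs : 0 < s) (hd : 0 < d) :
    PySem.Int.mod k (s * d)
      = PySem.Int.mod k s + PySem.Int.mod (PySem.Int.floordiv k s) d * s := by
  have hsd : 0 < s * d := mul_pos hs hd
  rw [PySem.Int.mod_eq_emod_of_pos hsd, PySem.Int.mod_eq_emod_of_pos hs,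
    PySem.Int.floordiv_eq_ediv_of_pos hs, PySem.Int.mod_eq_emod_of_pos hd]
  have h1 : s * (k / s) + k % s = k := Int.mul_ediv_add_emod k s
  have h2 : d * ((k / s) / d) + (k / s) % d = k / s := Int.mul_ediv_add_emod (k / s) d
  have hr1 : 0 ≤ k % s := Int.emod_nonneg _ (by omega)
  have hr1' : k % s < s := Int.emod_lt_of_pos _ hs
  have hr2 : 0 ≤ (k / s) % d := Int.emod_nonneg _ (by omega)
  have hr2' : (k / s) % d < d := Int.emod_lt_of_pos _ hd
  have hk : k = (k % s + (k / s) % d * s) + s * d * ((k / s) / d) := by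
    have : k = s * (d * ((k / s) / d) + (k / s) % d) + k % s := by rw [h2]; omega
    ring_nf at this ⊢
    linarith [this]
  have hlt : k % s + (k / s) % d * s < s * d := by nlinarith
  have hge : 0 ≤ k % s + (k / s) % d * s := by nlinarith
  calc k % (s * d) = ((k % s + (k / s) % d * s) + s * d * ((k / s) / d)) % (s * d) := by
        rw [← hk]
    _ = (k % s + (k / s) % d * s) % (s * d) := by
        rw [Int.add_mul_emod_self_left]
    _ = k % s + (k / s) % d * s := Int.emod_eq_of_lt hge hlt

-- with positive degrees A's accumulated offset is exactly rank mod stride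
lemma oAcc_mod (k : Int) (pre : List Int) (h : ∀ d ∈ pre, 0 < d) :
    oAcc k pre = PySem.Int.mod k (sProd pre) := by
  induction pre using List.reverseRecOn with
  | nil =>
      show (0 : Int) = PySem.Int.mod k 1
      rw [PySem.Int.mod_eq_emod_of_pos (by norm_num)]
      simp
  | append_singleton ds d ih =>
      have hs : 0 < sProd ds := sProd_pos ds (fun x hx => h x (List.mem_append_left _ hx))
      have hd : 0 < d := h d (List.mem_append_right _ (by simp))
      rw [oAcc_append, ih (fun x hx => h x (List.mem_append_left _ hx)), sProd_append,
        mod_decomp k _ d hs hd]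
      rfl

-- the closed form: A's sorted, modulo-reduced group equals B's ascending progression
lemma grp_closed (k s d : Int) (hs : 0 < s) (hd : 0 < d) :
    grpVal k s (PySem.Int.mod k s) d = bVal k s d := by
  unfold grpVal bVal
  have hmap : (PySem.List.pyRange 0 d 1).map
      (fun j => PySem.Int.mod (PySem.Int.mod k s + j * s) (s * d)
        + PySem.Int.floordiv k (s * d) * (s * d))
      = (PySem.List.pyRange 0 d 1).map
        (fun j => PySem.Int.floordiv k (s * d) * (s * d) + PySem.Int.mod k s + j * s) := by
    apply List.map_congr_left
    intro j hj
    obtain ⟨hj0, hjd⟩ := (PySem.List.mem_pyRange_one).mp hj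
    obtain ⟨ho0, hos⟩ := mod_bounds k s hs
    have hin : PySem.Int.mod (PySem.Int.mod k s + j * s) (s * d)
        = PySem.Int.mod k s + j * s := by
      rw [PySem.Int.mod_eq_emod_of_pos (mul_pos hs hd)]
      exact Int.emod_eq_of_lt (by nlinarith) (by nlinarith)
    rw [hin]; ring
  rw [hmap]
  apply PySem.List.sorted_eq_self_of_pairwise
  have := PySem.List.pairwise_lt_pyRange_one (a := 0) (b := d)
  refine (List.pairwise_map).mpr ?_
  refine this.imp ?_
  intro a b hab
  have : a * s < b * s := by exact mul_lt_mul_of_pos_right hab hs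
  omega

lemma tgoC_eq_tgoB (N : Nat) (rest : List (String × Int)) (pre : List Int)
    (h : ∀ d ∈ pre ++ rest.map (fun p => p.2), 0 < d) :
    tgoC N rest pre = tgoB N rest pre := by
  induction rest generalizing pre with
  | nil => rfl
  | cons p rest ih =>
      have hs : 0 < sProd pre := sProd_pos pre (fun x hx => h x (List.mem_append_left _ hx))
      have hd : 0 < p.2 := h p.2 (List.mem_append_right _ (by simp))
      have hmap : List.map (fun k : Nat => ((k : Int), grpVal (k : Int) (sProd pre) (oAcc (k : Int) pre) p.2)) (List.range N)
          = List.map (fun k : Nat => ((k : Int), bVal (k : Int) (sProd pre) p.2)) (List.range N) := by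
        apply List.map_congr_left
        intro k _
        have := oAcc_mod (k : Int) pre (fun x hx => h x (List.mem_append_left _ hx))
        rw [this, grp_closed _ _ _ hs hd]
      have htail : tgoC N rest (pre ++ [p.2]) = tgoB N rest (pre ++ [p.2]) := by
        apply ih
        intro x hx
        apply h
        simp only [List.map_cons, List.append_assoc, List.cons_append] at hx ⊢
        simpa using hx
      rw [tgoC, tgoB, hmap, htail]

-- an in-place dict update leaves entries with other keys untouched
lemma map_keep_of_ne {ν : Type} (k : String) (v : ν) (L : List (String × ν))
    (h : ∀ q ∈ L, q.1 ≠ k) :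
    L.map (fun q => if (q.1 == k) = true then (k, v) else q) = L := by
  induction L with
  | nil => rfl
  | cons q L ih =>
      have h1 : q.1 ≠ k := h q List.mem_cons_self
      simp only [List.map_cons]
      rw [if_neg (fun hc => h1 (by simpa using hc)),
        ih (fun r hr => h r (List.mem_cons_of_mem _ hr))]

-- ---- B side ----

lemma strides_fold (degs : List (String × Int)) :
    ∀ (acc : List Int) (s : Int),
      (degs.foldl (fun (a : List Int × Int) p => (a.1 ++ [a.2], a.2 * p.2)) (acc, s)).1
        = acc ++ stridesFrom s degs := by
  induction degs with
  | nil => intro acc s; simp [stridesFrom]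
  | cons p degs ih =>
      intro acc s
      rw [List.foldl_cons]
      simpa [stridesFrom] using ih (acc ++ [s]) (s * p.2)

lemma innerB (s d cs : Int) (M : Nat) :
    (List.map (fun k : Nat => (k : Int)) (List.range M)).foldl (pvBRankStep s d cs)
        (PySem.Dict.empty, PySem.Dict.empty)
      = (PySem.Dict.mk (List.map (fun k : Nat => ((k : Int), rkVal k s d)) (List.range M)),
         PySem.Dict.mk (List.map (fun k : Nat =>
           ((k : Int), (PySem.List.pyRange 0 d 1).map
             (fun j => PySem.Int.floordiv (k : Int) cs * cs + PySem.Int.mod (k : Int) s + j * s)))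
           (List.range M))) := by
  induction M with
  | zero => rfl
  | succ M ih =>
      rw [List.range_succ, List.map_append, List.foldl_append, ih]
      simp only [List.map_cons, List.map_nil, List.foldl_cons, List.foldl_nil, pvBRankStep]
      have hcR : (PySem.Dict.mk (List.map (fun k : Nat => ((k : Int), rkVal k s d)) (List.range M))).contains
          ((M : Nat) : Int) = false := by
        rw [PySem.Dict.contains_eq_decide_mem_keys]
        simp [PySem.Dict.keys_mk]
      have hcG : (PySem.Dict.mk (List.map (fun k : Nat =>
          ((k : Int), (PySem.List.pyRange 0 d 1).map
            (fun j => PySem.Int.floordiv (k : Int) cs * cs + PySem.Int.mod (k : Int) s + j * s)))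
          (List.range M))).contains ((M : Nat) : Int) = false := by
        rw [PySem.Dict.contains_eq_decide_mem_keys]
        simp [PySem.Dict.keys_mk]
      simp only [Prod.mk.injEq]
      constructor
      · apply PySem.Dict.ext
        rw [PySem.Dict.items_insert_of_not_contains _ _ hcR]
        simp [rkVal]
      · apply PySem.Dict.ext
        rw [PySem.Dict.items_insert_of_not_contains _ _ hcG]
        simp

lemma outerB (num_nodes : Int) :
    ∀ (rest : List (String × Int)) (pre : List Int)
      (doneC : List (String × PySem.Dict Int (List Int)))
      (doneR : List (String × PySem.Dict Int Int)),
      (doneC.map (fun q => q.1) ++ rest.map (fun p => p.1)).Nodup →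
      doneR.map (fun q => q.1) = doneC.map (fun q => q.1) →
      (rest.zip (stridesFrom (sProd pre) rest)).foldl (pvBDimStep num_nodes)
        (PySem.Dict.mk doneC, PySem.Dict.mk doneR)
      = (PySem.Dict.mk (doneC ++ tgoB num_nodes.toNat rest pre),
         PySem.Dict.mk (doneR ++ tgoR num_nodes.toNat rest pre)) := by
  intro rest
  induction rest with
  | nil =>
      intro pre doneC doneR _ _
      simp [tgoB, tgoR, stridesFrom]
  | cons p rest ih =>
      intro pre doneC doneR hk hkeq
      have hfresh : p.1 ∉ doneC.map (fun q => q.1) := by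
        intro hmem
        have := (List.nodup_append.mp hk).2.2
        exact this p.1 hmem p.1 (by simp) rfl
      have hcC : (PySem.Dict.mk doneC).contains p.1 = false := by
        rw [PySem.Dict.contains_eq_decide_mem_keys]
        simpa [PySem.Dict.keys_mk] using hfresh
      have hcR : (PySem.Dict.mk doneR).contains p.1 = false := by
        rw [PySem.Dict.contains_eq_decide_mem_keys]
        simp only [PySem.Dict.keys_mk, hkeq]
        simpa [PySem.Dict.keys_mk] using hfresh
      show ((p, sProd pre) :: rest.zip (stridesFrom (sProd pre * p.2) rest)).foldl
          (pvBDimStep num_nodes) (PySem.Dict.mk doneC, PySem.Dict.mk doneR) = _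
      rw [List.foldl_cons]
      have hstep : pvBDimStep num_nodes (PySem.Dict.mk doneC, PySem.Dict.mk doneR) (p, sProd pre)
          = (PySem.Dict.mk (doneC ++
              [(p.1, PySem.Dict.mk (List.map (fun k : Nat => ((k : Int), bVal k (sProd pre) p.2)) (List.range num_nodes.toNat)))]),
             PySem.Dict.mk (doneR ++
              [(p.1, PySem.Dict.mk (List.map (fun k : Nat => ((k : Int), rkVal k (sProd pre) p.2)) (List.range num_nodes.toNat)))])) := by
        simp only [pvBDimStep, PySem.List.pyRange_zero]
        rw [innerB (sProd pre) p.2 (sProd pre * p.2) num_nodes.toNat]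
        simp only [Prod.mk.injEq]
        constructor
        · apply PySem.Dict.ext
          rw [PySem.Dict.items_insert_of_not_contains _ _ hcC]
          rfl
        · apply PySem.Dict.ext
          rw [PySem.Dict.items_insert_of_not_contains _ _ hcR]
      rw [hstep]
      have := ih (pre ++ [p.2])
          (doneC ++ [(p.1, PySem.Dict.mk (List.map (fun k : Nat => ((k : Int), bVal k (sProd pre) p.2)) (List.range num_nodes.toNat)))])
          (doneR ++ [(p.1, PySem.Dict.mk (List.map (fun k : Nat => ((k : Int), rkVal k (sProd pre) p.2)) (List.range num_nodes.toNat)))])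
          (by simpa [List.append_assoc] using hk)
          (by simp [hkeq])
      rw [sProd_append] at this
      rw [this]
      simp [tgoB, tgoR, List.append_assoc]

-- ---- A side ----

lemma innerA (par_degrees : List (String × Int)) (M : Nat) :
    ∀ (rest : List (String × Int)) (pre : List Int)
      (preC : List (String × PySem.Dict Int (List Int)))
      (preR : List (String × PySem.Dict Int Int)),
      (preC.map (fun q => q.1) ++ rest.map (fun p => p.1)).Nodup →
      preR.map (fun q => q.1) = preC.map (fun q => q.1) →
      (∀ p ∈ rest, (PySem.Dict.mk par_degrees).getD p.1 0 = p.2) →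
      rest.foldl (pvAStep par_degrees (M : Int))
        ((sProd pre, sProd pre, oAcc (M : Int) pre),
         PySem.Dict.mk (preC ++ tgoC M rest pre), PySem.Dict.mk (preR ++ tgoR M rest pre))
      = ((sProd (pre ++ rest.map (fun p => p.2)), sProd (pre ++ rest.map (fun p => p.2)),
          oAcc (M : Int) (pre ++ rest.map (fun p => p.2))),
         PySem.Dict.mk (preC ++ tgoC (M + 1) rest pre),
         PySem.Dict.mk (preR ++ tgoR (M + 1) rest pre)) := by
  intro rest
  induction rest with
  | nil =>
      intro pre preC preR _ _ _
      simp [tgoC, tgoR]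
  | cons p rest ih =>
      intro pre preC preR hk hkeq hlook
      rw [List.foldl_cons]
      have hd : (PySem.Dict.mk par_degrees).getD p.1 0 = p.2 := hlook p (by simp)
      have hdisjC : ∀ q ∈ preC, q.1 ≠ p.1 := by
        intro q hq
        have := (List.nodup_append.mp hk).2.2
        exact this q.1 (List.mem_map_of_mem hq) p.1 (by simp)
      have hrest : p.1 ∉ rest.map (fun p => p.1) := by
        have := (List.nodup_append.mp hk).2.1
        exact (List.nodup_cons.mp this).1
      have hkeysC : (PySem.Dict.mk (preC ++ tgoC M (p :: rest) pre)).keys.Nodup := by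
        rw [PySem.Dict.keys_mk, List.map_append, tgoC_keys]
        exact hk
      have hdisjR : ∀ q ∈ preR, q.1 ≠ p.1 := by
        intro q hq
        have h1 : q.1 ∈ preC.map (fun q => q.1) := by
          rw [← hkeq]; exact List.mem_map_of_mem hq
        obtain ⟨q', hq', he⟩ := List.mem_map.mp h1
        exact he ▸ hdisjC q' hq'
      have hkeysR : (PySem.Dict.mk (preR ++ tgoR M (p :: rest) pre)).keys.Nodup := by
        rw [PySem.Dict.keys_mk, List.map_append, tgoR_keys, hkeq]
        exact hk
      have hgetC : (PySem.Dict.mk (preC ++ tgoC M (p :: rest) pre)).getD p.1 PySem.Dict.empty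
          = PySem.Dict.mk (List.map (fun k : Nat => ((k : Int), grpVal k (sProd pre) (oAcc k pre) p.2)) (List.range M)) := by
        apply PySem.Dict.getD_of_mem_items _ _ hkeysC
        simp [tgoC]
      have hgetR : (PySem.Dict.mk (preR ++ tgoR M (p :: rest) pre)).getD p.1 PySem.Dict.empty
          = PySem.Dict.mk (List.map (fun k : Nat => ((k : Int), rkVal k (sProd pre) p.2)) (List.range M)) := by
        apply PySem.Dict.getD_of_mem_items _ _ hkeysR
        simp [tgoR]
      have hcolC : (PySem.Dict.mk (List.map (fun k : Nat => ((k : Int), grpVal k (sProd pre) (oAcc k pre) p.2)) (List.range M))).insert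
            ((M : Nat) : Int) (grpVal ((M : Nat) : Int) (sProd pre) (oAcc ((M : Nat) : Int) pre) p.2)
          = PySem.Dict.mk (List.map (fun k : Nat => ((k : Int), grpVal k (sProd pre) (oAcc k pre) p.2)) (List.range (M + 1))) := by
        apply PySem.Dict.ext
        rw [PySem.Dict.items_insert_of_not_contains]
        · simp [List.range_succ]
        · rw [PySem.Dict.contains_eq_decide_mem_keys]
          simp [PySem.Dict.keys_mk]
      have hcolR : (PySem.Dict.mk (List.map (fun k : Nat => ((k : Int), rkVal k (sProd pre) p.2)) (List.range M))).insert
            ((M : Nat) : Int) (rkVal ((M : Nat) : Int) (sProd pre) p.2)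
          = PySem.Dict.mk (List.map (fun k : Nat => ((k : Int), rkVal k (sProd pre) p.2)) (List.range (M + 1))) := by
        apply PySem.Dict.ext
        rw [PySem.Dict.items_insert_of_not_contains]
        · simp [List.range_succ]
        · rw [PySem.Dict.contains_eq_decide_mem_keys]
          simp [PySem.Dict.keys_mk]
      have houtC : (PySem.Dict.mk (preC ++ tgoC M (p :: rest) pre)).insert p.1
            (PySem.Dict.mk (List.map (fun k : Nat => ((k : Int), grpVal k (sProd pre) (oAcc k pre) p.2)) (List.range (M + 1))))
          = PySem.Dict.mk (preC ++
              (p.1, PySem.Dict.mk (List.map (fun k : Nat => ((k : Int), grpVal k (sProd pre) (oAcc k pre) p.2)) (List.range (M + 1))))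
                :: tgoC M rest (pre ++ [p.2])) := by
        apply PySem.Dict.ext
        rw [PySem.Dict.items_insert_of_contains]
        · show (preC ++ tgoC M (p :: rest) pre).map _ = _
          rw [tgoC]
          rw [List.map_append, List.map_cons, map_keep_of_ne _ _ _ hdisjC,
            map_keep_of_ne _ _ _ (by intro q hq; have := List.mem_map_of_mem (f := fun q => q.1) hq
                                     rw [tgoC_keys] at this
                                     exact fun he => hrest (he ▸ this))]
          simp
        · rw [PySem.Dict.contains_eq_decide_mem_keys]
          simp [PySem.Dict.keys_mk, tgoC]
      have houtR : (PySem.Dict.mk (preR ++ tgoR M (p :: rest) pre)).insert p.1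
            (PySem.Dict.mk (List.map (fun k : Nat => ((k : Int), rkVal k (sProd pre) p.2)) (List.range (M + 1))))
          = PySem.Dict.mk (preR ++
              (p.1, PySem.Dict.mk (List.map (fun k : Nat => ((k : Int), rkVal k (sProd pre) p.2)) (List.range (M + 1))))
                :: tgoR M rest (pre ++ [p.2])) := by
        apply PySem.Dict.ext
        rw [PySem.Dict.items_insert_of_contains]
        · show (preR ++ tgoR M (p :: rest) pre).map _ = _
          rw [tgoR]
          rw [List.map_append, List.map_cons,
            map_keep_of_ne _ _ _ hdisjR,
            map_keep_of_ne _ _ _ (by intro q hq; have := List.mem_map_of_mem (f := fun q => q.1) hq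
                                     rw [tgoR_keys] at this
                                     exact fun he => hrest (he ▸ this))]
          simp
        · rw [PySem.Dict.contains_eq_decide_mem_keys]
          simp [PySem.Dict.keys_mk, tgoR]
      have hstep : pvAStep par_degrees ((M : Nat) : Int)
          (((sProd pre, sProd pre, oAcc ((M : Nat) : Int) pre)),
            PySem.Dict.mk (preC ++ tgoC M (p :: rest) pre),
            PySem.Dict.mk (preR ++ tgoR M (p :: rest) pre)) p
        = (((sProd (pre ++ [p.2]), sProd (pre ++ [p.2]), oAcc ((M : Nat) : Int) (pre ++ [p.2]))),
            PySem.Dict.mk (preC ++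
              (p.1, PySem.Dict.mk (List.map (fun k : Nat => ((k : Int), grpVal k (sProd pre) (oAcc k pre) p.2)) (List.range (M + 1))))
                :: tgoC M rest (pre ++ [p.2])),
            PySem.Dict.mk (preR ++
              (p.1, PySem.Dict.mk (List.map (fun k : Nat => ((k : Int), rkVal k (sProd pre) p.2)) (List.range (M + 1))))
                :: tgoR M rest (pre ++ [p.2]))) := by
        simp only [pvAStep, hd, hgetC, hgetR]
        rw [show (PySem.Int.mod (PySem.Int.floordiv ((M : Nat) : Int) (sProd pre)) p.2)
              = rkVal ((M : Nat) : Int) (sProd pre) p.2 from rfl]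
        rw [show (PySem.List.sorted ((PySem.List.pyRange 0 p.2 1).map
                (fun j => PySem.Int.mod (oAcc ((M : Nat) : Int) pre + j * sProd pre) (sProd pre * p.2)
                  + PySem.Int.floordiv ((M : Nat) : Int) (sProd pre * p.2) * (sProd pre * p.2)))
                (fun x => x) false)
              = grpVal ((M : Nat) : Int) (sProd pre) (oAcc ((M : Nat) : Int) pre) p.2 from rfl]
        rw [hcolC, hcolR, houtC, houtR, sProd_append, oAcc_append]
      rw [hstep]
      have := ih (pre ++ [p.2])
          (preC ++ [(p.1, PySem.Dict.mk (List.map (fun k : Nat => ((k : Int), grpVal k (sProd pre) (oAcc k pre) p.2)) (List.range (M + 1))))])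
          (preR ++ [(p.1, PySem.Dict.mk (List.map (fun k : Nat => ((k : Int), rkVal k (sProd pre) p.2)) (List.range (M + 1))))])
          (by simpa [List.append_assoc] using hk)
          (by simp [hkeq])
          (fun q hq => hlook q (List.mem_cons_of_mem _ hq))
      simp only [List.append_assoc, List.cons_append, List.nil_append] at this ⊢
      rw [this]
      simp [tgoC, tgoR]

lemma outerA (par_degrees : List (String × Int))
    (hn : (par_degrees.map (fun p => p.1)).Nodup) :
    ∀ (M : Nat),
      (List.map (fun k : Nat => (k : Int)) (List.range M)).foldl (pvARank par_degrees)
        (par_degrees.foldl (fun d p => d.insert p.1 PySem.Dict.empty) PySem.Dict.empty,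
         par_degrees.foldl (fun d p => d.insert p.1 PySem.Dict.empty) PySem.Dict.empty)
      = (PySem.Dict.mk (tgoC M par_degrees []), PySem.Dict.mk (tgoR M par_degrees [])) := by
  have hlook : ∀ p ∈ par_degrees, (PySem.Dict.mk par_degrees).getD p.1 0 = p.2 := by
    intro p hp
    apply PySem.Dict.getD_of_mem_items
    · show (p.1, p.2) ∈ par_degrees
      simpa using hp
    · rw [PySem.Dict.keys_mk]; exact hn
  intro M
  induction M with
  | zero =>
      simp only [List.range_zero, List.map_nil, List.foldl_nil]
      have h0C : par_degrees.foldl (fun d p => d.insert p.1 PySem.Dict.empty)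
            (PySem.Dict.empty : PySem.Dict String (PySem.Dict Int (List Int)))
          = PySem.Dict.mk (tgoC 0 par_degrees []) := by
        apply PySem.Dict.ext
        rw [PySem.Dict.items_foldl_insert_fresh par_degrees (fun p => p.1) (fun _ => PySem.Dict.empty)
            PySem.Dict.empty (fun a _ => by simp) hn]
        rw [tgoC_zero]
        rfl
      have h0R : par_degrees.foldl (fun d p => d.insert p.1 PySem.Dict.empty)
            (PySem.Dict.empty : PySem.Dict String (PySem.Dict Int Int))
          = PySem.Dict.mk (tgoR 0 par_degrees []) := by
        apply PySem.Dict.ext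
        rw [PySem.Dict.items_foldl_insert_fresh par_degrees (fun p => p.1) (fun _ => PySem.Dict.empty)
            PySem.Dict.empty (fun a _ => by simp) hn]
        rw [tgoR_zero]
        rfl
      rw [h0C, h0R]
  | succ M ih =>
      rw [List.range_succ, List.map_append, List.foldl_append, ih]
      simp only [List.map_cons, List.map_nil, List.foldl_cons, List.foldl_nil, pvARank]
      have h1 := innerA par_degrees M par_degrees [] [] [] (by simpa using hn) rfl hlook
      simp only [List.nil_append] at h1
      rw [show ((1 : Int), (1 : Int), (0 : Int))
            = (sProd [], sProd [], oAcc ((M : Nat) : Int) []) from rfl]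
      rw [h1]

-- ===== VERDICT (by name: the statement is the Claim_ definition above) =====
theorem get_comm_groups_spec : Claim_equal_get_comm_groups := by
  intro num_nodes par_degrees _ hpre
  unfold Spec_get_comm_groups
  obtain ⟨hn, hdeg⟩ := hpre
  have hB := outerB num_nodes par_degrees [] [] [] (by simpa using hn) rfl
  simp only [List.nil_append] at hB
  have hstr : (par_degrees.foldl
      (fun (a : List Int × Int) p => (a.1 ++ [a.2], a.2 * p.2)) ([], 1)).1
      = stridesFrom (sProd []) par_degrees := by
    rw [strides_fold]
    rfl
  simp only [get_comm_groups, get_comm_groups_alt, PySem.List.pyRange_zero, hstr]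
  rw [outerA par_degrees hn num_nodes.toNat,
    show (PySem.Dict.empty : PySem.Dict String (PySem.Dict Int (List Int))) = PySem.Dict.mk [] from rfl,
    show (PySem.Dict.empty : PySem.Dict String (PySem.Dict Int Int)) = PySem.Dict.mk [] from rfl,
    hB]
  have hCB : tgoC num_nodes.toNat par_degrees [] = tgoB num_nodes.toNat par_degrees [] := by
    rcases hdeg with hle | hpos
    · have h0 : num_nodes.toNat = 0 := by omega
      rw [h0, tgoC_zero, tgoB_zero]
    · apply tgoC_eq_tgoB
      intro d hd
      simp only [List.nil_append, List.mem_map] at hd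
      obtain ⟨p, hp, he⟩ := hd
      exact he ▸ hpos p hp
  rw [hCB]
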